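-- pv_equiv track=rewrite | github.com/BenBouiss/NN_intern_2022 | .ipynb_checkpoints/NN-checkpoint.py | Hyp_param_list
-- ===== SOURCE A (Python) =====
-- def Hyp_param_list(Ind, Max):
--     List = ['1', '4', '16', '32', '64']
--     string = []
--     Possible = List[min(4, Max - 1 + Ind) :min(Max + 1 + Ind, len(List))]
--     if Ind == Max:
--         return Possible
--     else:
--         Next = Hyp_param_list(Ind + 1, Max)
--         return ['_'.join([j, i]) for i in Next for j in Possible]
-- ===== SOURCE B (Python) =====
-- def Hyp_param_list(Ind, Max):
--     L = ['1', '4', '16', '32', '64']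
--     result = L[min(4, Max - 1 + Ind):min(Max + 1 + Ind, len(L))]
--     lvl = Ind + 1
--     while lvl <= Max and result:
--         possible = L[min(4, Max - 1 + lvl):min(Max + 1 + lvl, len(L))]
--         result = [i + '_' + j for j in possible for i in result]
--         lvl += 1
--     return result
-- ===== Notes on version B (the rewrite author's own statement) =====
-- stated objective: simpler
-- what changed: Replaces A's top-down recursion (one stack frame per level, gluing each level's slice on the left of the recursive result with '_'.join) with a single ascending while loop seeded at level Ind that concatenates each higher level's slice onto the accumulator with plain string concatenation and exits early once the accumulator is empty (empty stays empty).
import Mathlib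
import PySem

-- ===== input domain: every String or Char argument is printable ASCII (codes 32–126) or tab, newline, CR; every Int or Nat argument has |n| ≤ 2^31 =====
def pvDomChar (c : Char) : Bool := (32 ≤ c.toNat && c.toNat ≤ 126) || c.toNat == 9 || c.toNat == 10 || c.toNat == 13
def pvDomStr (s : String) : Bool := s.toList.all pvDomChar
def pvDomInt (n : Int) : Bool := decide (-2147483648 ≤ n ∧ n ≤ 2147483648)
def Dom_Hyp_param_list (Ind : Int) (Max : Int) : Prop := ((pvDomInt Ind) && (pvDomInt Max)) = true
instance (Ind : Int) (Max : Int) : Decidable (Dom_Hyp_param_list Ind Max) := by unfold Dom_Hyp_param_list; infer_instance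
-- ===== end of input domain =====

-- B replaces A's top-down recursion by one ascending while loop over the levels Ind+1..Max with an
-- accumulator seeded at level Ind and an early exit once the accumulator is empty (different
-- decomposition; return values agree on all of Pre_).

-- ===== PORT A =====
-- A's recursion on Ind, made total with a fuel counter; under Pre_ (Ind ≤ Max) the fuel
-- (Max-Ind)+1 is exactly the Python recursion depth, so the fuel-0 branch is never reached.
def hypGoA : Nat → Int → Int → List String
  | 0, _, _ => []          -- unreachable under Pre_ (Python recurses past Max forever: RecursionError)
  | fuel + 1, Ind, Max =>
    let L : List String := ["1", "4", "16", "32", "64"]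
    let Possible := PySem.List.slice L (some (min 4 (Max - 1 + Ind))) (some (min (Max + 1 + Ind) 5))
    if Ind = Max then Possible
    else
      let Next := hypGoA fuel (Ind + 1) Max
      Next.flatMap (fun i => Possible.map (fun j => PySem.Str.join "_" [j, i]))

def Hyp_param_list (Ind : Int) (Max : Int) : List String :=
  hypGoA ((Max - Ind).toNat + 1) Ind Max

-- ===== PORT B =====
-- Source B's loop body: fold in the slice of one level lvl ('result = [i + '_' + j for j in possible for i in result]')
def altStep (Max lvl : Int) (res : List String) : List String :=
  let L : List String := ["1", "4", "16", "32", "64"]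
  let possible := PySem.List.slice L (some (min 4 (Max - 1 + lvl))) (some (min (Max + 1 + lvl) 5))
  possible.flatMap (fun j => res.map (fun i => i ++ "_" ++ j))

-- Source B's while loop 'while lvl <= Max and result:'; the fuel (Max - lvl + 1).toNat is exactly the
-- trip count 'lvl <= Max' allows, and the 'and result' early exit is the 'res = []' test.
def altLoop : Nat → Int → Int → List String → List String
  | 0, _, _, res => res
  | fuel + 1, Max, lvl, res =>
    if res = [] then res
    else altLoop fuel Max (lvl + 1) (altStep Max lvl res)

def Hyp_param_list_alt (Ind : Int) (Max : Int) : List String :=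
  let L : List String := ["1", "4", "16", "32", "64"]
  let init := PySem.List.slice L (some (min 4 (Max - 1 + Ind))) (some (min (Max + 1 + Ind) 5))
  altLoop ((Max - Ind).toNat) Max (Ind + 1) init

-- ===== PRECONDITION & SPEC =====
-- Pre_ excludes exactly Ind > Max, where A recurses without a base case and raises RecursionError.
def Pre_Hyp_param_list (Ind : Int) (Max : Int) : Prop := Ind ≤ Max
instance (Ind : Int) (Max : Int) : Decidable (Pre_Hyp_param_list Ind Max) := by unfold Pre_Hyp_param_list; infer_instance
def pvWitness_Hyp_param_list : Int × Int := (0, 2)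

def Spec_Hyp_param_list (Ind : Int) (Max : Int) (out : List String) : Prop := out = Hyp_param_list_alt Ind Max
instance (Ind : Int) (Max : Int) (out : List String) : Decidable (Spec_Hyp_param_list Ind Max out) := by unfold Spec_Hyp_param_list; infer_instance

-- ===== CLAIM (what is proved, stated in full; the proofs are below) =====
def Claim_equal_Hyp_param_list : Prop := ∀ (Ind : Int) (Max : Int), Dom_Hyp_param_list Ind Max → Pre_Hyp_param_list Ind Max → Spec_Hyp_param_list Ind Max (Hyp_param_list Ind Max)

-- ===== LEMMAS AND PROOFS =====

-- A's join of two pieces is plain concatenation with '_'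
theorem join_two (j i : String) : PySem.Str.join "_" [j, i] = j ++ "_" ++ i := by
  apply String.toList_inj.mp
  simp [PySem.Str.toList_join, PySem.Chars.join_cons_cons, PySem.Chars.join_singleton,
    String.toList_append]

theorem altLoop_nil (n : Nat) (Max lvl : Int) : altLoop n Max lvl [] = [] := by
  cases n <;> rfl

-- B's step at any level commutes with gluing a fixed inner level P on the right of each string
theorem altStep_comm (Max lvl : Int) (P res : List String) :
    altStep Max lvl (res.flatMap (fun i => P.map (fun j => j ++ "_" ++ i))) =
      (altStep Max lvl res).flatMap (fun i => P.map (fun j => j ++ "_" ++ i)) := by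
  simp [altStep, List.map_flatMap, List.flatMap_map, List.flatMap_assoc, Function.comp_def,
    String.append_assoc]

-- and so does the whole loop (the early exit agrees on both sides: gluing P keeps/makes res empty
-- exactly when P or res is empty, and then both sides are [])
theorem altLoop_comm (n : Nat) : ∀ (Max lvl : Int) (P res : List String),
    altLoop n Max lvl (res.flatMap (fun i => P.map (fun j => j ++ "_" ++ i))) =
      (altLoop n Max lvl res).flatMap (fun i => P.map (fun j => j ++ "_" ++ i)) := by
  induction n with
  | zero => intro Max lvl P res; rfl
  | succ n ih =>
    intro Max lvl P res
    by_cases hres : res = []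
    · subst hres; simp [altLoop]
    · by_cases hP : P = []
      · subst hP
        have h0 : res.flatMap (fun i => ([] : List String).map (fun j => j ++ "_" ++ i)) = [] :=
          List.flatMap_eq_nil_iff.mpr (fun _ _ => rfl)
        rw [h0, altLoop_nil]
        exact (List.flatMap_eq_nil_iff.mpr (fun _ _ => rfl)).symm
      · have hne : res.flatMap (fun i => P.map (fun j => j ++ "_" ++ i)) ≠ [] := by
          obtain ⟨a, ha⟩ := List.exists_mem_of_ne_nil res hres
          intro hcon
          exact hP (List.map_eq_nil_iff.mp (List.flatMap_eq_nil_iff.mp hcon _ ha))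
        rw [altLoop, if_neg hne, altLoop, if_neg hres, altStep_comm, ih]

theorem hypGoA_eq_alt (n : Nat) : ∀ (Ind Max : Int), Ind ≤ Max → (Max - Ind).toNat = n →
    hypGoA (n + 1) Ind Max = Hyp_param_list_alt Ind Max := by
  induction n with
  | zero =>
    intro Ind Max h hn
    have hIM : Ind = Max := by omega
    subst hIM
    rw [hypGoA, Hyp_param_list_alt]
    simp
    rfl
  | succ n ih =>
    intro Ind Max h hn
    have hne : Ind ≠ Max := by omega
    rw [hypGoA]
    simp only [if_neg hne]
    rw [ih (Ind + 1) Max (by omega) (by omega)]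
    simp only [join_two]
    rw [Hyp_param_list_alt, Hyp_param_list_alt]
    have h1 : (Max - Ind).toNat = n + 1 := hn
    have h2 : (Max - (Ind + 1)).toNat = n := by omega
    rw [h1, h2, ← altLoop_comm]
    by_cases hP : PySem.List.slice (["1", "4", "16", "32", "64"] : List String)
        (some (min 4 (Max - 1 + Ind))) (some (min (Max + 1 + Ind) 5)) = []
    · have h0 : (PySem.List.slice (["1", "4", "16", "32", "64"] : List String)
            (some (min 4 (Max - 1 + (Ind + 1)))) (some (min (Max + 1 + (Ind + 1)) 5))).flatMap
            (fun i =>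
              (PySem.List.slice (["1", "4", "16", "32", "64"] : List String)
                (some (min 4 (Max - 1 + Ind))) (some (min (Max + 1 + Ind) 5))).map
                (fun j => j ++ "_" ++ i)) = [] := by
        rw [hP]
        exact List.flatMap_eq_nil_iff.mpr (fun _ _ => rfl)
      rw [h0, altLoop_nil, altLoop, if_pos hP, hP]
    · rw [altLoop, if_neg hP]
      rfl

-- ===== VERDICT (by name: the statement is the Claim_ definition above) =====
theorem Hyp_param_list_spec : Claim_equal_Hyp_param_list := by
  intro Ind Max _ hpre
  unfold Spec_Hyp_param_list Hyp_param_list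
  exact hypGoA_eq_alt ((Max - Ind).toNat) Ind Max hpre rfl
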